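-- pv_equiv track=rewrite | github.com/FAdy-200/Courses-and-problemsolving | Hackerrank/Morgan and a String.py | stri
-- ===== SOURCE A (Python) =====
-- def stri(a, b, ans):
--     if len(b) == 0:
--         return ans + a
--     elif len(a) == 0:
--         return ans + b
--     else:
--         if (ans + a[0]) < (ans + b[0]):
--             ans = ans + a[0]
--             a = a[1:]
--         elif (ans + a[0]) > (ans + b[0]):
--             ans = ans + b[0]
--             b = b[1:]
--         else:
--             if a[0] > b[0]:
--                 ans = ans + b[0]
--                 b = b[1:]
--             else:
--                 ans = ans + a[0]
--                 a = a[1:]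
--     return stri(a, b, ans)
-- ===== SOURCE B (Python) =====
-- def stri(a, b, ans):
--     # Iterative two-pointer merge: O(n) appends joined once, vs A's O(n^2)
--     # recursion with full-string concatenations.
--     out = [ans]
--     i = j = 0
--     while i < len(a) and j < len(b):
--         if a[i] <= b[j]:
--             out.append(a[i])
--             i += 1
--         else:
--             out.append(b[j])
--             j += 1
--     out.append(a[i:])
--     out.append(b[j:])
--     return ''.join(out)
-- ===== Notes on version B (the rewrite author's own statement) =====
-- stated objective: faster
-- what changed: Replaced A's recursion that rebuilds and lexicographically compares the whole growing answer string at every step with an iterative two-pointer merge that compares one character per step and joins an append-list once at the end.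
import Mathlib
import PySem

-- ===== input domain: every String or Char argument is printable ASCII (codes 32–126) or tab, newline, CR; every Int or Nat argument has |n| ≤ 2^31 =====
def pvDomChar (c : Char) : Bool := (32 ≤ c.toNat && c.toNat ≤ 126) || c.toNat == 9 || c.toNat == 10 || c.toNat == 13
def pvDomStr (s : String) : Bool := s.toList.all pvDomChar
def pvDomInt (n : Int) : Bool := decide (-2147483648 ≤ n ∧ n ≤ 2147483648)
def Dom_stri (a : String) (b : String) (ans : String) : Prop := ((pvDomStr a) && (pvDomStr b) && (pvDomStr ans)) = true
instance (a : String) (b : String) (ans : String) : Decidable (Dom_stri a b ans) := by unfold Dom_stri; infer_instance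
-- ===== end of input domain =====

-- B replaces A's O(n^2) recursion (full-string concatenations and comparisons at each
-- step) with an O(n) iterative two-pointer merge comparing single characters.

-- ===== PORT A =====
-- A's recursion, transliterated over List Char (Python str `<` is Lean `<` on List Char,
-- per PySem; a[0] / a[1:] are the head / tail of the nonempty list).
def striChars (a : List Char) (b : List Char) (ans : List Char) : List Char :=
  if b.length = 0 then ans ++ a
  else if a.length = 0 then ans ++ b
  else
    match a, b with
    | x :: a', y :: b' =>
      if (ans ++ [x]) < (ans ++ [y]) then striChars a' (y :: b') (ans ++ [x])
      else if (ans ++ [y]) < (ans ++ [x]) then striChars (x :: a') b' (ans ++ [y])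
      else
        if y < x then striChars (x :: a') b' (ans ++ [y])
        else striChars a' (y :: b') (ans ++ [x])
    | _, _ => ans   -- unreachable: both lists nonempty here
termination_by a.length + b.length
decreasing_by all_goals simp

def stri (a : String) (b : String) (ans : String) : String :=
  String.ofList (striChars a.toList b.toList ans.toList)

-- ===== PORT B =====
-- Source B's while loop: index pointers i, j into a and b, an output accumulator seeded
-- with ans, the leftover slices a[i:], b[j:] appended after the loop.
def striLoop (la : List Char) (lb : List Char) (i : Nat) (j : Nat) (out : List Char) : List Char :=
  if h : i < la.length ∧ j < lb.length then
    if la[i]'h.1 ≤ lb[j]'h.2 then striLoop la lb (i + 1) j (out ++ [la[i]'h.1])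
    else striLoop la lb i (j + 1) (out ++ [lb[j]'h.2])
  else out ++ la.drop i ++ lb.drop j
termination_by (la.length - i) + (lb.length - j)
decreasing_by all_goals omega

def stri_alt (a : String) (b : String) (ans : String) : String :=
  String.ofList (striLoop a.toList b.toList 0 0 ans.toList)

-- ===== PRECONDITION & SPEC =====
def Spec_stri (a : String) (b : String) (ans : String) (out : String) : Prop := out = stri_alt a b ans
instance (a : String) (b : String) (ans : String) (out : String) : Decidable (Spec_stri a b ans out) := by unfold Spec_stri; infer_instance

-- ===== CLAIM (what is proved, stated in full; the proofs are below) =====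
def Claim_equal_stri : Prop := ∀ (a : String) (b : String) (ans : String), Dom_stri a b ans → Spec_stri a b ans (stri a b ans)

-- ===== LEMMAS AND PROOFS =====

-- Common reference: the plain head-to-head merge both programs compute around `ans`.
def mrg : List Char → List Char → List Char
  | a, [] => a
  | [], b => b
  | x :: a, y :: b => if x ≤ y then x :: mrg a (y :: b) else y :: mrg (x :: a) b

theorem append_singleton_lt_iff (l : List Char) (x y : Char) :
    (l ++ [x]) < (l ++ [y]) ↔ x < y := by
  induction l with
  | nil => simp [List.cons_lt_cons_iff]
  | cons c t ih => simpa [List.cons_lt_cons_iff] using ih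

theorem striChars_eq_mrg (a b ans : List Char) : striChars a b ans = ans ++ mrg a b := by
  fun_induction striChars a b ans with
  | case1 a b ans hb =>
    rw [List.length_eq_zero_iff] at hb; subst hb
    cases a <;> simp [mrg]
  | case2 a b ans hb ha =>
    rw [List.length_eq_zero_iff] at ha; subst ha
    cases b with
    | nil => simp at hb
    | cons y b' => simp [mrg]
  | case3 ans x a' y b' hlt ha hb ih =>
    rw [append_singleton_lt_iff] at hlt
    rw [ih, mrg, if_pos (le_of_lt hlt)]; simp
  | case4 ans x a' y b' hlt hgt ha hb ih =>
    rw [append_singleton_lt_iff] at hgt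
    rw [ih, mrg, if_neg (not_le.mpr hgt)]; simp
  | case5 ans x a' y b' hlt hgt hyx ha hb ih =>
    rw [append_singleton_lt_iff] at hgt
    exact absurd hyx hgt
  | case6 ans x a' y b' hlt hgt hyx ha hb ih =>
    rw [ih, mrg, if_pos (not_lt.mp hyx)]; simp
  | case7 a b ans hb ha hno =>
    cases a with
    | nil => simp at ha
    | cons x a' =>
      cases b with
      | nil => simp at hb
      | cons y b' => exact absurd rfl (fun h => hno x a' y b' rfl h)

theorem striLoop_eq_mrg (la lb : List Char) (i j : Nat) (out : List Char) :
    striLoop la lb i j out = out ++ mrg (la.drop i) (lb.drop j) := by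
  fun_induction striLoop la lb i j out with
  | case1 i j out h hle ih =>
    rw [ih, ← List.getElem_cons_drop (as := la) (i := i), ← List.getElem_cons_drop (as := lb) (i := j),
      mrg, if_pos hle]
    · simp
    · exact h.2
    · exact h.1
  | case2 i j out h hle ih =>
    rw [ih, ← List.getElem_cons_drop (as := la) (i := i), ← List.getElem_cons_drop (as := lb) (i := j),
      mrg, if_neg hle]
    · simp
    · exact h.2
    · exact h.1
  | case3 i j out h =>
    rcases Decidable.not_and_iff_or_not.mp h with h1 | h2
    · rw [List.drop_eq_nil_of_le (not_lt.mp h1)]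
      cases hd : lb.drop j <;> simp [mrg]
    · rw [List.drop_eq_nil_of_le (not_lt.mp h2)]
      cases hd : la.drop i <;> simp [mrg]

-- ===== VERDICT (by name: the statement is the Claim_ definition above) =====
theorem stri_spec : Claim_equal_stri := by
  intro a b ans _
  unfold Spec_stri stri stri_alt
  rw [striChars_eq_mrg, striLoop_eq_mrg]
  simp
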